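-- pv_equiv track=rewrite | github.com/farmani60/coding_practice | topic4_hashmaps/MigretoryBirds.py | migretoryBirsds
-- ===== SOURCE A (Python) =====
-- def migretoryBirsds(arr):
--     birdsType = createMap(arr)
--     typeBird = None
--     numBird = 0
--     for i in birdsType.keys():
--         if birdsType[i] > numBird:
--             typeBird = i
--             numBird = birdsType[i]
--         elif (birdsType[i] == numBird) and (i < typeBird):
--             typeBird = i
--     return typeBird
--
-- def createMap(arr):
--     birdsType = dict()
--     for i in range(len(arr)):
--         if arr[i] not in birdsType.keys():
--             birdsType[arr[i]] = 1
--         else: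
--             birdsType[arr[i]] += 1
--     return birdsType
-- ===== SOURCE B (Python) =====
-- def migretoryBirsds(arr):
--     # sort-then-run-length scan; returns None on empty input like A
--     if not arr:
--         return None
--     s = sorted(arr)
--     best, best_len = s[0], 0
--     i, n = 0, len(s)
--     while i < n:
--         j = i + 1
--         while j < n and s[j] == s[i]:
--             j += 1
--         if j - i > best_len:
--             best, best_len = s[i], j - i
--         i = j
--     return best
-- ===== Notes on version B (the rewrite author's own statement) =====
-- stated objective: alternative
-- what changed: Replaces A's dict-based counting plus a key-order scan by sorting a copy of the array and scanning run lengths in one pass, updating the best only on a strictly longer run so the smallest value wins ties.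
-- outside the precondition, e.g. on migretoryBirsds([]): A returns None, B returns None
import Mathlib
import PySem

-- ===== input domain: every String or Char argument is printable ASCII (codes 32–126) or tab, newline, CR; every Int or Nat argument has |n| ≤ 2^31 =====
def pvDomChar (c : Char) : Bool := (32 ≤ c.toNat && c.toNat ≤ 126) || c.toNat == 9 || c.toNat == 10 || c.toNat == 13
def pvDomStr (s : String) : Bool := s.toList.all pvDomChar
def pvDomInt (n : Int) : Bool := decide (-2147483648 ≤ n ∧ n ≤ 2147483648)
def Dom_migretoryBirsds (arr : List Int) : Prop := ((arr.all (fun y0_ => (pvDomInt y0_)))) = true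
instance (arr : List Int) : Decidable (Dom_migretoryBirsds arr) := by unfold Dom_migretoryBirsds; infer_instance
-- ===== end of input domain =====

-- B replaces A's dict-based counting + key-order scan by sort-then-run-length scanning; return-value equivalence on nonempty lists.


-- ===== PORT A =====
-- createMap: for i in range(len(arr)): if arr[i] not in d.keys(): d[arr[i]] = 1 else: d[arr[i]] += 1
-- (i is always in range here, so pyGetD with default 0 is exact; 'x in d.keys()' is d.contains)
def createMap (arr : List Int) : PySem.Dict Int Int :=
  (PySem.List.pyRange 0 (PySem.List.len arr) 1).foldl
    (fun d i =>
      let x := PySem.List.pyGetD arr i 0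
      if d.contains x = false then d.insert x 1
      else d.insert x (d.getD x 0 + 1))
    PySem.Dict.empty

-- main loop over the dict's keys; birdsType[i] is present for every key i, so getD 0 is exact.
-- Python returns None for empty arr (typeBird is never set); that input is excluded by Pre_, the port returns 0 there.
-- 'i < typeBird' is only ever evaluated with typeBird set (numBird > 0 then); the 'none' arm is unreachable.
def migretoryBirsds (arr : List Int) : Int :=
  let birdsType := createMap arr
  let res := birdsType.keys.foldl
    (fun (st : Option Int × Int) i =>
      let c := birdsType.getD i 0
      if c > st.2 then (some i, c)
      else if c == st.2 && (match st.1 with | some t => decide (i < t) | none => false) then (some i, st.2)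
      else st)
    (none, 0)
  res.1.getD 0

-- ===== PORT B =====
-- the outer while loop of Source B as recursion on the unscanned suffix; the inner while loop
-- that finds the end j of the current run is the takeWhile/dropWhile split at the head value
def scanRuns : List Int → Int → Int → Int
  | [], best, _ => best
  | x :: t, best, bestLen =>
      let k := ((x :: t).takeWhile (fun y => y == x)).length
      if (k : Int) > bestLen then scanRuns ((x :: t).dropWhile (fun y => y == x)) x (k : Int)
      else scanRuns ((x :: t).dropWhile (fun y => y == x)) best bestLen
termination_by s => s.length
decreasing_by
  all_goals
    simp only [List.dropWhile_cons, beq_self_eq_true, if_true]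
    exact Nat.lt_succ_of_le (List.length_dropWhile_le _ _)

-- Python returns None on empty arr; that input is excluded by Pre_, the port returns 0 there.
def migretoryBirsds_alt (arr : List Int) : Int :=
  if arr = [] then 0
  else
    let s := PySem.List.sorted arr (fun x => x) false
    scanRuns s (s.headD 0) 0

-- ===== PRECONDITION & SPEC =====
-- Pre_ excludes only the empty list, on which both Pythons return None, which is not a value of type int.
def Pre_migretoryBirsds (arr : List Int) : Prop := arr ≠ []
instance (arr : List Int) : Decidable (Pre_migretoryBirsds arr) := by unfold Pre_migretoryBirsds; infer_instance
def pvWitness_migretoryBirsds : List Int := [3, 1, 3, 2, 1]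

def Spec_migretoryBirsds (arr : List Int) (out : Int) : Prop := out = migretoryBirsds_alt arr
instance (arr : List Int) (out : Int) : Decidable (Spec_migretoryBirsds arr out) := by unfold Spec_migretoryBirsds; infer_instance

-- ===== CLAIM (what is proved, stated in full; the proofs are below) =====
def Claim_equal_migretoryBirsds : Prop := ∀ (arr : List Int), Dom_migretoryBirsds arr → Pre_migretoryBirsds arr → Spec_migretoryBirsds arr (migretoryBirsds arr)

-- ===== LEMMAS AND PROOFS =====

-- the common specification: the smallest value among those of maximal multiplicity
def Best (arr : List Int) (v : Int) : Prop :=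
  v ∈ arr ∧ ∀ w ∈ arr, arr.count w < arr.count v ∨ (arr.count w = arr.count v ∧ v ≤ w)

theorem best_unique {arr : List Int} {v w : Int} (hv : Best arr v) (hw : Best arr w) : v = w := by
  rcases hv with ⟨hvm, hv⟩
  rcases hw with ⟨hwm, hw⟩
  rcases hv w hwm with h1 | ⟨h1, h1'⟩ <;> rcases hw v hvm with h2 | ⟨h2, h2'⟩ <;> omega

-- ---- A side ----

theorem createMap_eq_counter (arr : List Int) : createMap arr = PySem.Dict.counter arr := by
  unfold createMap
  refine (PySem.List.foldl_pyRange_pyGetD (xs := arr) (d := 0)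
        (f := fun (d : PySem.Dict Int Int) (x : Int) =>
          if d.contains x = false then d.insert x 1
          else d.insert x (d.getD x 0 + 1))
        (init := PySem.Dict.empty) (a := 0) (by norm_num)).trans ?_
  simp only [Int.toNat_zero, List.drop_zero]
  rw [PySem.List.foldl_congr_mem (g := fun d x => d.insert x (d.getD x 0 + 1))]
  · exact PySem.Dict.foldl_insert_getD_add_one_eq_counter arr
  · intro d x _
    by_cases hc : d.contains x = false
    · rw [if_pos hc, PySem.Dict.getD_of_not_contains d 0 hc]; norm_num
    · simp [hc]

-- A's main loop, abstracted over the count function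
def stepA (c : Int → Int) (st : Option Int × Int) (i : Int) : Option Int × Int :=
  if c i > st.2 then (some i, c i)
  else if c i == st.2 && (match st.1 with | some t => decide (i < t) | none => false) then (some i, st.2)
  else st

theorem foldA_some (c : Int → Int) : ∀ (K : List Int) (t : Int),
    ∃ t', K.foldl (stepA c) (some t, c t) = (some t', c t') ∧
      (t' = t ∨ t' ∈ K) ∧ c t ≤ c t' ∧ (c t = c t' → t' ≤ t) ∧
      ∀ w ∈ K, c w < c t' ∨ (c w = c t' ∧ t' ≤ w) := by
  intro K
  induction K with
  | nil =>
    intro t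
    exact ⟨t, rfl, Or.inl rfl, le_refl _, fun _ => le_refl _, by simp⟩
  | cons i K' ih =>
    intro t
    simp only [List.foldl_cons]
    by_cases h1 : c i > c t
    · have hs : stepA c (some t, c t) i = (some i, c i) := by simp [stepA, h1]
      rw [hs]
      obtain ⟨t', e, m, le, heq, all⟩ := ih i
      refine ⟨t', e, ?_, by omega, by omega, ?_⟩
      · rcases m with m | m
        · exact Or.inr (by simp [m])
        · exact Or.inr (List.mem_cons_of_mem _ m)
      · intro w hw
        rcases List.mem_cons.1 hw with rfl | hw
        · rcases lt_or_eq_of_le le with h | h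
          · exact Or.inl h
          · exact Or.inr ⟨h, heq h⟩
        · exact all w hw
    · by_cases h2 : c i = c t
      · by_cases h3 : i < t
        · have hs : stepA c (some t, c t) i = (some i, c i) := by
            simp [stepA, h2, h3]
          rw [hs]
          obtain ⟨t', e, m, le, heq, all⟩ := ih i
          refine ⟨t', e, ?_, by omega, by intro h; have := heq (by omega); omega, ?_⟩
          · rcases m with m | m
            · exact Or.inr (by simp [m])
            · exact Or.inr (List.mem_cons_of_mem _ m)
          · intro w hw
            rcases List.mem_cons.1 hw with rfl | hw
            · rcases lt_or_eq_of_le le with h | h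
              · exact Or.inl h
              · exact Or.inr ⟨h, heq h⟩
            · exact all w hw
        · have hs : stepA c (some t, c t) i = (some t, c t) := by
            simp [stepA, h2, h3]
          rw [hs]
          obtain ⟨t', e, m, le, heq, all⟩ := ih t
          refine ⟨t', e, ?_, le, heq, ?_⟩
          · rcases m with m | m
            · exact Or.inl m
            · exact Or.inr (List.mem_cons_of_mem _ m)
          · intro w hw
            rcases List.mem_cons.1 hw with rfl | hw
            · by_cases h4 : c w = c t'
              · exact Or.inr ⟨h4, by have := heq (by omega); omega⟩
              · exact Or.inl (by omega)
            · exact all w hw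
      · have hs : stepA c (some t, c t) i = (some t, c t) := by
          simp [stepA, h1, h2]
        rw [hs]
        obtain ⟨t', e, m, le, heq, all⟩ := ih t
        refine ⟨t', e, ?_, le, heq, ?_⟩
        · rcases m with m | m
          · exact Or.inl m
          · exact Or.inr (List.mem_cons_of_mem _ m)
        · intro w hw
          rcases List.mem_cons.1 hw with rfl | hw
          · exact Or.inl (by omega)
          · exact all w hw

theorem foldA_cons (c : Int → Int) (x : Int) (K : List Int) (hx : 0 < c x) :
    ∃ t', (x :: K).foldl (stepA c) (none, 0) = (some t', c t') ∧ t' ∈ x :: K ∧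
      ∀ w ∈ x :: K, c w < c t' ∨ (c w = c t' ∧ t' ≤ w) := by
  have hs : stepA c (none, 0) x = (some x, c x) := by simp [stepA, hx]
  rw [List.foldl_cons, hs]
  obtain ⟨t', e, m, le, heq, all⟩ := foldA_some c K x
  refine ⟨t', e, ?_, ?_⟩
  · rcases m with m | m
    · simp [m]
    · exact List.mem_cons_of_mem _ m
  · intro w hw
    rcases List.mem_cons.1 hw with rfl | hw
    · rcases lt_or_eq_of_le le with h | h
      · exact Or.inl h
      · exact Or.inr ⟨h, heq h⟩
    · exact all w hw

theorem migretoryBirsds_best (arr : List Int) (h : arr ≠ []) :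
    ∃ v, Best arr v ∧ migretoryBirsds arr = v := by
  simp only [migretoryBirsds, createMap_eq_counter, PySem.Dict.keys_counter]
  have hfold : ∀ init, (PySem.Set.ofList arr).foldl
      (fun (st : Option Int × Int) i =>
        let c := (PySem.Dict.counter arr).getD i 0
        if c > st.2 then (some i, c)
        else if c == st.2 && (match st.1 with | some t => decide (i < t) | none => false) then (some i, st.2)
        else st) init
      = (PySem.Set.ofList arr).foldl (stepA (fun v => ((arr.count v : Nat) : Int))) init := by
    intro init
    apply PySem.List.foldl_congr_mem
    intro st i _
    simp only [stepA, PySem.Dict.getD_counter]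
  rw [hfold]
  obtain ⟨a, ta, ha⟩ := List.exists_cons_of_ne_nil h
  have hmemset : ∀ v, v ∈ PySem.Set.ofList arr ↔ v ∈ arr := fun v => PySem.Set.mem_ofList arr v
  have hne : PySem.Set.ofList arr ≠ [] := by
    intro hnil
    have : a ∈ PySem.Set.ofList arr := (hmemset a).2 (by simp [ha])
    simp [hnil] at this
  obtain ⟨x, K, hK⟩ := List.exists_cons_of_ne_nil hne
  rw [hK]
  have hx : (0 : Int) < ((arr.count x : Nat) : Int) := by
    have : x ∈ arr := (hmemset x).1 (by simp [hK])
    have := List.count_pos_iff.2 this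
    omega
  obtain ⟨t', e, m, all⟩ := foldA_cons (fun v => ((arr.count v : Nat) : Int)) x K hx
  refine ⟨t', ⟨?_, ?_⟩, by rw [e]; rfl⟩
  · exact (hmemset t').1 (hK ▸ m)
  · intro w hw
    have := all w (by rw [← hK]; exact (hmemset w).2 hw)
    rcases this with h' | ⟨h', h''⟩
    · exact Or.inl (by exact_mod_cast h')
    · exact Or.inr ⟨by exact_mod_cast h', h''⟩

-- ---- B side ----

-- facts about the leading run of a sorted (Pairwise ≤) nonempty list
theorem run_facts (x : Int) (t : List Int) (hs : (x :: t).Pairwise (· ≤ ·)) :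
    ((x :: t).takeWhile (fun y => y == x)).length = (x :: t).count x ∧
    (∀ v ∈ (x :: t).dropWhile (fun y => y == x), x < v) ∧
    ((x :: t).dropWhile (fun y => y == x)).Pairwise (· ≤ ·) ∧
    (∀ v, v ≠ x → ((x :: t).dropWhile (fun y => y == x)).count v = (x :: t).count v) := by
  set s := x :: t with hset
  have htd : s.takeWhile (fun y => y == x) ++ s.dropWhile (fun y => y == x) = s :=
    List.takeWhile_append_dropWhile
  have htake : ∀ v ∈ s.takeWhile (fun y => y == x), v = x := by
    intro v hv
    simpa using List.mem_takeWhile_imp hv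
  have hdropPW : (s.dropWhile (fun y => y == x)).Pairwise (· ≤ ·) :=
    hs.sublist (List.dropWhile_sublist _)
  have hlt : ∀ v ∈ s.dropWhile (fun y => y == x), x < v := by
    cases hd : s.dropWhile (fun y => y == x) with
    | nil => simp
    | cons e r =>
      have he_ne : ¬ (e == x) = true := by
        have := List.head?_dropWhile_not (fun y => y == x) s
        rw [hd] at this; simpa using this
      have he_mem : e ∈ s := (List.dropWhile_sublist (l := s) (fun y => y == x)).mem (by simp [hd])
      have hxle : ∀ v ∈ t, x ≤ v := by
        intro v hv; exact (List.pairwise_cons.1 hs).1 v hv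
      have hxe : x < e := by
        rcases List.mem_cons.1 he_mem with rfl | hm
        · simp at he_ne
        · have : x ≤ e := hxle e hm
          rcases lt_or_eq_of_le this with h | h
          · exact h
          · exact absurd (by simp [h.symm]) he_ne
      intro v hv
      rcases List.mem_cons.1 hv with rfl | hm
      · exact hxe
      · have := (List.pairwise_cons.1 (hd ▸ hdropPW)).1 v hm
        omega
  refine ⟨?_, hlt, hdropPW, ?_⟩
  · have h1 : (s.takeWhile (fun y => y == x)).count x = (s.takeWhile (fun y => y == x)).length :=
      List.count_eq_length.2 (fun b hb => (htake b hb).symm)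
    have h2 : (s.dropWhile (fun y => y == x)).count x = 0 :=
      List.count_eq_zero.2 (fun hx => absurd hx (by intro hm; exact absurd rfl (ne_of_gt (hlt x hm))))
    calc (s.takeWhile (fun y => y == x)).length
        = (s.takeWhile (fun y => y == x)).count x + (s.dropWhile (fun y => y == x)).count x := by
          omega
      _ = s.count x := by rw [← List.count_append, htd]
  · intro v hv
    have h3 : (s.takeWhile (fun y => y == x)).count v = 0 :=
      List.count_eq_zero.2 (fun hm => hv (htake v hm))
    calc (s.dropWhile (fun y => y == x)).count v
        = (s.takeWhile (fun y => y == x)).count v + (s.dropWhile (fun y => y == x)).count v := by omega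
      _ = s.count v := by rw [← List.count_append, htd]

theorem scanRuns_spec : ∀ (n : Nat) (s : List Int), s.length ≤ n → s.Pairwise (· ≤ ·) →
    ∀ (b bl : Int),
    (scanRuns s b bl = b ∧ ∀ v ∈ s, ((s.count v : Nat) : Int) ≤ bl) ∨
    (scanRuns s b bl ∈ s ∧ bl < ((s.count (scanRuns s b bl) : Nat) : Int) ∧
      ∀ v ∈ s, s.count v < s.count (scanRuns s b bl) ∨
        (s.count v = s.count (scanRuns s b bl) ∧ scanRuns s b bl ≤ v)) := by
  intro n
  induction n with
  | zero =>
    intro s hlen _ b bl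
    have : s = [] := List.eq_nil_of_length_eq_zero (by omega)
    subst this
    exact Or.inl ⟨by simp [scanRuns], by simp⟩
  | succ n ih =>
    intro s hlen hs b bl
    cases s with
    | nil => exact Or.inl ⟨by simp [scanRuns], by simp⟩
    | cons x t =>
      obtain ⟨hk, hlt, hpw, hcnt⟩ := run_facts x t hs
      set drop := (x :: t).dropWhile (fun y => y == x) with hdrop
      set k := ((x :: t).takeWhile (fun y => y == x)).length with hkdef
      have hdlen : drop.length ≤ n := by
        have h1 : drop.length ≤ t.length := by
          rw [hdrop, List.dropWhile_cons]
          simp only [beq_self_eq_true, if_true]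
          exact List.length_dropWhile_le _ _
        simp at hlen; omega
      have hmem_split : ∀ v ∈ x :: t, v = x ∨ v ∈ drop := by
        intro v hv
        by_cases hvx : v = x
        · exact Or.inl hvx
        · right
          have := List.takeWhile_append_dropWhile (p := fun y => y == x) (l := x :: t)
          rw [← this] at hv
          rcases List.mem_append.1 hv with h | h
          · exfalso
            exact hvx (by simpa using List.mem_takeWhile_imp h)
          · exact h
      have hdmem : ∀ v ∈ drop, v ∈ x :: t :=
        fun v hv => (List.dropWhile_sublist (l := x :: t) (fun y => y == x)).mem hv
      have hdne : ∀ v ∈ drop, v ≠ x := fun v hv => ne_of_gt (hlt v hv)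
      have hxmem : x ∈ x :: t := List.mem_cons_self
      have hkpos : 0 < k := hk ▸ List.count_pos_iff.2 hxmem
      rw [scanRuns]
      simp only [← hdrop, ← hkdef]
      by_cases hcase : (k : Int) > bl
      · rw [if_pos hcase]
        rcases ih drop hdlen hpw x (k : Int) with ⟨he, hall⟩ | ⟨hm, hgt, hall⟩
        · rw [he]
          refine Or.inr ⟨hxmem, by omega, ?_⟩
          intro v hv
          rcases hmem_split v hv with rfl | hvd
          · exact Or.inr ⟨rfl, le_refl _⟩
          · have h1 := hall v hvd
            have h2 : (x :: t).count v = drop.count v := (hcnt v (hdne v hvd)).symm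
            have h3 := hlt v hvd
            by_cases h4 : (x :: t).count v = (x :: t).count x
            · exact Or.inr ⟨h4, le_of_lt h3⟩
            · left; omega
        · set r := scanRuns drop x (k : Int) with hr
          have hrd : r ∈ drop := hm
          have hrne : r ≠ x := hdne r hrd
          have hrc : (x :: t).count r = drop.count r := (hcnt r hrne).symm
          refine Or.inr ⟨hdmem r hrd, by omega, ?_⟩
          intro v hv
          rcases hmem_split v hv with rfl | hvd
          · left
            rw [hk] at hgt
            omega
          · have h1 := hall v hvd
            have h2 : (x :: t).count v = drop.count v := (hcnt v (hdne v hvd)).symm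
            rcases h1 with h | ⟨h, h'⟩
            · left; omega
            · exact Or.inr ⟨by omega, h'⟩
      · rw [if_neg hcase]
        rcases ih drop hdlen hpw b bl with ⟨he, hall⟩ | ⟨hm, hgt, hall⟩
        · rw [he]
          refine Or.inl ⟨rfl, ?_⟩
          intro v hv
          rcases hmem_split v hv with rfl | hvd
          · rw [← hk]; omega
          · have h1 := hall v hvd
            have h2 : (x :: t).count v = drop.count v := (hcnt v (hdne v hvd)).symm
            omega
        · set r := scanRuns drop b bl with hr
          have hrd : r ∈ drop := hm
          have hrne : r ≠ x := hdne r hrd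
          have hrc : (x :: t).count r = drop.count r := (hcnt r hrne).symm
          refine Or.inr ⟨hdmem r hrd, by omega, ?_⟩
          intro v hv
          rcases hmem_split v hv with rfl | hvd
          · left
            rw [hk] at hcase
            omega
          · have h1 := hall v hvd
            have h2 : (x :: t).count v = drop.count v := (hcnt v (hdne v hvd)).symm
            rcases h1 with h | ⟨h, h'⟩
            · left; omega
            · exact Or.inr ⟨by omega, h'⟩

theorem migretoryBirsds_alt_best (arr : List Int) (h : arr ≠ []) :
    ∃ v, Best arr v ∧ migretoryBirsds_alt arr = v := by
  unfold migretoryBirsds_alt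
  rw [if_neg h]
  set s := PySem.List.sorted arr (fun x => x) false with hsdef
  have hperm : s.Perm arr := PySem.List.sorted_perm arr (fun x => x) false
  have hpw : s.Pairwise (· ≤ ·) := PySem.List.sorted_pairwise arr (fun x => x)
  have hsne : s ≠ [] := by
    intro hnil
    exact h ((PySem.List.sorted_eq_nil_iff arr (fun x => x) false).1 hnil)
  obtain ⟨y, ys, hy⟩ := List.exists_cons_of_ne_nil hsne
  have hhead : s.headD 0 ∈ s := by rw [hy]; simp
  rcases scanRuns_spec s.length s le_rfl hpw (s.headD 0) 0 with ⟨_, hall⟩ | ⟨hm, _, hall⟩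
  · exfalso
    have h1 := hall (s.headD 0) hhead
    have h2 : 0 < s.count (s.headD 0) := List.count_pos_iff.2 hhead
    omega
  · refine ⟨scanRuns s (s.headD 0) 0, ⟨hperm.mem_iff.1 hm, ?_⟩, rfl⟩
    intro w hw
    have hws : w ∈ s := hperm.mem_iff.2 hw
    have := hall w hws
    rw [hperm.count_eq, hperm.count_eq] at this
    exact this

-- ===== VERDICT (by name: the statement is the Claim_ definition above) =====
theorem migretoryBirsds_spec : Claim_equal_migretoryBirsds := by
  intro arr _ hpre
  unfold Spec_migretoryBirsds
  obtain ⟨v, hv, hveq⟩ := migretoryBirsds_best arr hpre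
  obtain ⟨w, hw, hweq⟩ := migretoryBirsds_alt_best arr hpre
  rw [hveq, hweq, best_unique hv hw]
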